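-- pv_equiv track=rewrite | github.com/silent-snowww/BBCS-June-24-Git-WS | rev_demos/demo_1.py | function
-- ===== SOURCE A (Python) =====
-- def next(x):
--     x = (287*x + 123213) % 26
--     return x
--
-- def function(msg):
--     output = ""
--     y = 7
--     for letter in msg:
--         letter_as_num = ord(letter)
--         y = next(y)
--         new_num = letter_as_num + y
--         output += chr(new_num)
--     return output
-- ===== SOURCE B (Python) =====
-- def function(msg):
--     # offset for index i is (6 - i) % 26: 287 % 26 == 1 and 123213 % 26 == 25,
--     # so the LCG is just y -> (y - 1) % 26 starting from 7.
--     return "".join(chr(ord(c) + (6 - i) % 26) for i, c in enumerate(msg))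
-- ===== Notes on version B (the rewrite author's own statement) =====
-- stated objective: simpler
-- what changed: B drops the LCG helper and mutable state entirely: since 287%26==1 and 123213%26==25 the recurrence collapses to a per-index closed-form offset (6-i)%26, so B is a one-line join over enumerate(msg).
import Mathlib
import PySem

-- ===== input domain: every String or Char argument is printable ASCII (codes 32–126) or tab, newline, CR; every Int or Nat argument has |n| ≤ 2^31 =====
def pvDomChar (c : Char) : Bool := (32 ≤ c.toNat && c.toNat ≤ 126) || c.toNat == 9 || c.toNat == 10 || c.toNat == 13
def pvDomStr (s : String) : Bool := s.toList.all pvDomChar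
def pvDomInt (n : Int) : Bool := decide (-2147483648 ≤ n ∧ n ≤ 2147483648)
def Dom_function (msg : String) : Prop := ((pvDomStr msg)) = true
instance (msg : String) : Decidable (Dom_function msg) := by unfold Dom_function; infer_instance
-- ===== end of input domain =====

-- B replaces A's iterated LCG state by the closed-form per-index offset (6 - i) % 26: simpler.

-- ===== PORT A =====
-- A's helper `next`
def pyNext (x : Int) : Int := PySem.Int.mod (287 * x + 123213) 26

-- A's loop body: update y, append chr(ord(letter) + y)
def functionStep (st : List Char × Int) (letter : Char) : List Char × Int :=
  let y := pyNext st.2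
  (st.1 ++ [Char.ofNat ((letter.toNat : Int) + y).toNat], y)

def function (msg : String) : String :=
  String.ofList (msg.toList.foldl functionStep ([], 7)).1

-- ===== PORT B =====
-- chr(ord(c) + (6 - i) % 26) for one enumerated pair
def offChar (p : Int × Char) : Char :=
  Char.ofNat ((p.2.toNat : Int) + PySem.Int.mod (6 - p.1) 26).toNat

def function_alt (msg : String) : String :=
  String.ofList ((PySem.List.enumerate msg.toList 0).map offChar)

-- ===== PRECONDITION & SPEC =====
def Spec_function (msg : String) (out : String) : Prop := out = function_alt msg
instance (msg : String) (out : String) : Decidable (Spec_function msg out) := by unfold Spec_function; infer_instance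

-- ===== CLAIM (what is proved, stated in full; the proofs are below) =====
def Claim_equal_function : Prop := ∀ (msg : String), Dom_function msg → Spec_function msg (function msg)

-- ===== LEMMAS AND PROOFS =====

-- the LCG step on a state of the invariant shape: next ((7-i) % 26) = (6-i) % 26
lemma pyNext_inv (i : Int) : pyNext (PySem.Int.mod (7 - i) 26) = PySem.Int.mod (6 - i) 26 := by
  unfold pyNext
  rw [PySem.Int.mod_eq_emod_of_pos (by norm_num), PySem.Int.mod_eq_emod_of_pos (by norm_num),
      PySem.Int.mod_eq_emod_of_pos (by norm_num)]
  omega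

-- loop invariant: with y = (7 - i) % 26 before index i, A's fold produces B's mapped characters
lemma loop_eq (cs : List Char) : ∀ (acc : List Char) (i : Int),
    (cs.foldl functionStep (acc, PySem.Int.mod (7 - i) 26)).1
      = acc ++ (PySem.List.enumerate cs i).map offChar := by
  induction cs with
  | nil => intro acc i; simp [PySem.List.enumerate_nil]
  | cons c cs ih =>
      intro acc i
      have hc : (6 - i) = 7 - (i + 1) := by ring
      simp only [List.foldl_cons, PySem.List.enumerate_cons, List.map_cons]
      rw [show functionStep (acc, PySem.Int.mod (7 - i) 26) c
            = (acc ++ [offChar (i, c)], PySem.Int.mod (7 - (i + 1)) 26) by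
          simp only [functionStep, offChar, pyNext_inv, hc]]
      rw [ih]
      simp

-- ===== VERDICT (by name: the statement is the Claim_ definition above) =====
theorem function_spec : Claim_equal_function := by
  intro msg _
  show function msg = function_alt msg
  unfold function function_alt
  have h7 : (7 : Int) = PySem.Int.mod (7 - 0) 26 := by decide
  rw [h7, loop_eq msg.toList [] 0]
  simp
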